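-- pv_equiv track=rewrite | github.com/xzy429484853/CS112AllPython | twang9_206_P4.py | read_coords
-- ===== SOURCE A (Python) =====
-- def read_coords(s):
-- 	#outer is row, inner is columns for that row
-- 	#gstring is final answer string form
-- 	gstring_coords = []
-- 	#working list
-- 	rawstring_list = []
-- 	#splitting by the white spaces, \n lines are ignored in this case
-- 	rawstring_list = s.split()
-- 	#for i in range of len of rawstring
-- 	for i in range(len(rawstring_list)):
-- 		#for j in range of len of rawstringi
-- 		for j in range(len(rawstring_list[i])):
-- 			#if O or .
-- 			if rawstring_list[i][j] == '.' or rawstring_list[i][j] == 'O':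
-- 				#if alive
-- 				if rawstring_list[i][j] == 'O':
-- 					#append to gstring
-- 					gstring_coords.append((i,j))
-- 				#otherwise
-- 				else:
-- 					#keep going
-- 					continue
-- 			#if not O or .
-- 			else:
-- 				#something wrong, return none
-- 				return None
-- 	#if len of rows are not same
-- 	if len(rawstring_list[0]) != len(rawstring_list[-1]):
-- 		#return none
-- 		return None
-- 	#return gstringcoords
-- 	return gstring_coords
-- ===== SOURCE B (Python) =====
-- def read_coords(s):
--     rows = s.split()
--     for row in rows:
--         for ch in row:
--             if ch != '.' and ch != 'O':
--                 return None
--     if len(rows[0]) != len(rows[-1]):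
--         return None
--     return [(i, j) for i, row in enumerate(rows) for j, ch in enumerate(row) if ch == 'O']
-- ===== Notes on version B (the rewrite author's own statement) =====
-- stated objective: simpler
-- what changed: A's single interleaved scan that validates characters and accumulates coordinates in one nested index loop is split into a pure validation pass over the rows (no indices, early None), the first/last-row length check, and one comprehension over enumerate that builds the coordinate list.
import Mathlib
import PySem

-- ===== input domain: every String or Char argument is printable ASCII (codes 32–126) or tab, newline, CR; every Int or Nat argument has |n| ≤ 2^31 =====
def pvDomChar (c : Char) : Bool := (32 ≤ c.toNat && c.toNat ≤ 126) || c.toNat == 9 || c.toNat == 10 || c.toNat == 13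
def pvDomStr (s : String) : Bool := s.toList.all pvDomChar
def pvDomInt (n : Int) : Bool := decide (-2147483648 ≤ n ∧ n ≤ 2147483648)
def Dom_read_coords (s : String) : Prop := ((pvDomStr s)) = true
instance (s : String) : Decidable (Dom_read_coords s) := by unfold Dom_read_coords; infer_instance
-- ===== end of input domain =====

-- B splits A's single interleaved validate-and-collect scan into a validation pass plus a comprehension build pass; objective: simpler.

-- ===== PORT A =====
-- inner loop: for j in range(len(row)) over the row's characters, with early return None on a bad char
def readA_inner (i : Int) (cs : List Char) (j : Int) (acc : List (Int × Int)) :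
    Option (List (Int × Int)) :=
  match cs with
  | [] => some acc
  | c :: rest =>
    if c = '.' ∨ c = 'O' then
      if c = 'O' then readA_inner i rest (j + 1) (acc ++ [(i, j)])
      else readA_inner i rest (j + 1) acc
    else none

-- outer loop: for i in range(len(rawstring_list))
def readA_outer (rows : List String) (i : Int) (acc : List (Int × Int)) :
    Option (List (Int × Int)) :=
  match rows with
  | [] => some acc
  | r :: rest =>
    match readA_inner i r.toList 0 acc with
    | none => none
    | some acc' => readA_outer rest (i + 1) acc'

def read_coords (s : String) : Option (List (Int × Int)) :=
  let rawstring_list := PySem.Str.split₀ s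
  match readA_outer rawstring_list 0 [] with
  | none => none
  | some gstring_coords =>
    -- len(rawstring_list[0]) != len(rawstring_list[-1]) : IndexError on empty list is excluded by Pre_
    match PySem.List.pyGet? rawstring_list 0, PySem.List.pyGet? rawstring_list (-1) with
    | some r0, some rl =>
      if PySem.Str.len r0 ≠ PySem.Str.len rl then none else some gstring_coords
    | _, _ => none

-- ===== PORT B =====
def read_coords_alt (s : String) : Option (List (Int × Int)) :=
  let rows := PySem.Str.split₀ s
  if rows.all (fun r => r.toList.all (fun c => c = '.' ∨ c = 'O')) then
    match PySem.List.pyGet? rows 0 with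
    | none => none
    | some r0 =>
      match PySem.List.pyGet? rows (-1) with
      | none => none
      | some rl =>
        if PySem.Str.len r0 ≠ PySem.Str.len rl then none
        else
          some ((PySem.List.enumerate rows 0).flatMap (fun p =>
            (PySem.List.enumerate p.2.toList 0).filterMap (fun q =>
              if q.2 = 'O' then some (p.1, q.1) else none)))
  else none

-- ===== PRECONDITION & SPEC =====
-- Pre_ excludes whitespace-only strings, on which s.split() is empty and A raises IndexError at rawstring_list[0]
def Pre_read_coords (s : String) : Prop := PySem.Str.split₀ s ≠ []
instance (s : String) : Decidable (Pre_read_coords s) := by unfold Pre_read_coords; infer_instance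
def pvWitness_read_coords : String := ".O\nO."

def Spec_read_coords (s : String) (out : Option (List (Int × Int))) : Prop := out = read_coords_alt s
instance (s : String) (out : Option (List (Int × Int))) : Decidable (Spec_read_coords s out) := by unfold Spec_read_coords; infer_instance

-- ===== CLAIM (what is proved, stated in full; the proofs are below) =====
def Claim_equal_read_coords : Prop := ∀ (s : String), Dom_read_coords s → Pre_read_coords s → Spec_read_coords s (read_coords s)

-- ===== LEMMAS AND PROOFS =====

-- one row's contribution to B's list
def rowB (i : Int) (cs : List Char) (j : Int) : List (Int × Int) :=
  (PySem.List.enumerate cs j).filterMap (fun q => if q.2 = 'O' then some (i, q.1) else none)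

lemma readA_inner_eq (i : Int) (cs : List Char) (j : Int) (acc : List (Int × Int)) :
    readA_inner i cs j acc =
      if cs.all (fun c => c = '.' ∨ c = 'O') then some (acc ++ rowB i cs j) else none := by
  induction cs generalizing j acc with
  | nil => simp [readA_inner, rowB, PySem.List.enumerate]
  | cons c rest ih =>
    simp only [readA_inner, rowB, PySem.List.enumerate_cons, List.filterMap_cons, List.all_cons]
    by_cases h : c = '.' ∨ c = 'O'
    · rw [if_pos h]
      by_cases hO : c = 'O'
      · simp [hO, ih, rowB, List.append_assoc]
      · have hd : c = '.' := by tauto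
        simp [hd, ih, rowB]
    · rw [if_neg h]
      have hc : decide (c = '.' ∨ c = 'O') = false := decide_eq_false h
      simp [hc]

lemma readA_outer_eq (rows : List String) (i : Int) (acc : List (Int × Int)) :
    readA_outer rows i acc =
      if rows.all (fun r => r.toList.all (fun c => c = '.' ∨ c = 'O')) then
        some (acc ++ (PySem.List.enumerate rows i).flatMap (fun p =>
          (PySem.List.enumerate p.2.toList 0).filterMap (fun q =>
            if q.2 = 'O' then some (p.1, q.1) else none)))
      else none := by
  induction rows generalizing i acc with
  | nil => simp [readA_outer, PySem.List.enumerate]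
  | cons r rest ih =>
    simp only [readA_outer, readA_inner_eq, List.all_cons, PySem.List.enumerate_cons,
      List.flatMap_cons]
    by_cases h : r.toList.all (fun c => decide (c = '.' ∨ c = 'O')) = true
    · rw [if_pos h]
      show readA_outer rest (i + 1) (acc ++ rowB i r.toList 0) = _
      rw [ih]
      simp only [h, Bool.true_and, rowB, List.append_assoc]
    · rw [if_neg h]
      have hf : (r.toList.all fun c => decide (c = '.' ∨ c = 'O')) = false :=
        Bool.eq_false_iff.mpr h
      simp only [hf, Bool.false_and, Bool.false_eq_true, if_false]

theorem read_coords_spec_aux (s : String) :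
    read_coords s = read_coords_alt s := by
  unfold read_coords read_coords_alt
  simp only [readA_outer_eq]
  by_cases h : (PySem.Str.split₀ s).all
      (fun r => r.toList.all (fun c => c = '.' ∨ c = 'O')) = true
  · simp only [h, if_true, List.nil_append]
    cases PySem.List.pyGet? (PySem.Str.split₀ s) 0 <;>
      cases PySem.List.pyGet? (PySem.Str.split₀ s) (-1) <;> rfl
  · have hf : ((PySem.Str.split₀ s).all
        fun r => r.toList.all fun c => decide (c = '.' ∨ c = 'O')) = false :=
      Bool.eq_false_iff.mpr h
    simp only [hf, Bool.false_eq_true, if_false]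

-- ===== VERDICT (by name: the statement is the Claim_ definition above) =====
theorem read_coords_spec : Claim_equal_read_coords := by
  intro s _ _
  exact read_coords_spec_aux s
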